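-- pv_equiv track=rewrite | github.com/mmsaavedra1/Universidad | Laboratorios Intro a la Programacion/Semana 4/Encriptacion 1.py | cod_digitos
-- ===== SOURCE A (Python) =====
-- def cod_digitos(arg_numero):
--     # Numero codificado
--     numero_codificado = 0
--
--     # Se define la cantidad de cifras que tiene
--     contador = 10
--     cifras = 1
--     while arg_numero // contador != 0:
--         cifras += 1
--         contador *= 10
--
--     n = cifras  # ¡Si se quiere ocupar informacion que se itera se almacena en var auxiliares!
--
--     # Se recorre el numero
--     for i in range(1, cifras + 1):
--         # Se obtiene el resultado entero del resto con la cantidad de ceros asociados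
--         cifra = arg_numero // (10 ** (n - i))
--
--         # Se ejecuta la operacion de cifrado
--         resultado = n * cifra
--
--         # Se define la cantidad de cifras que tiene
--         contador = 10
--         cifras_final = 1
--         while resultado // contador != 0:
--             cifras_final += 1
--             contador *= 10
--
--         # Se obtiene el primer numero
--         final = resultado // (10 ** (cifras_final - 1))
--
--         numero_codificado += (final) * (10 ** (n - i))
--
--         # Se actualiza el numero
--         arg_numero = arg_numero % (10 ** (n - i))
--
--     return int(numero_codificado)
-- ===== SOURCE B (Python) =====
-- def cod_digitos(arg_numero):
--     # Digit count: shrink the number instead of growing a comparison power.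
--     n = 1
--     t = arg_numero
--     while t >= 10:
--         t //= 10
--         n += 1
--     # Single least-significant-first pass with divmod; no 10**k powers,
--     # no re-counting via a growing 'contador', no mod-update of the argument.
--     res = 0
--     p = 1
--     x = arg_numero
--     while x > 0:
--         x, d = divmod(x, 10)
--         t = n * d
--         while t >= 10:          # leading digit of n*d by repeated division
--             t //= 10
--         res += t * p
--         p *= 10
--     return res
-- ===== Notes on version B (the rewrite author's own statement) =====
-- stated objective: simpler
-- what changed: Replaces A's most-significant-first digit extraction (which recomputes powers of ten each step, re-counts digits of each product with a growing comparison power, and mods the argument down) by one least-significant-first divmod pass that takes the leading digit of each product by repeated division and rebuilds the result back-to-front with a running place value; Pre_ excludes negative inputs, on which A's digit-count loop never terminates.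
import Mathlib
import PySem

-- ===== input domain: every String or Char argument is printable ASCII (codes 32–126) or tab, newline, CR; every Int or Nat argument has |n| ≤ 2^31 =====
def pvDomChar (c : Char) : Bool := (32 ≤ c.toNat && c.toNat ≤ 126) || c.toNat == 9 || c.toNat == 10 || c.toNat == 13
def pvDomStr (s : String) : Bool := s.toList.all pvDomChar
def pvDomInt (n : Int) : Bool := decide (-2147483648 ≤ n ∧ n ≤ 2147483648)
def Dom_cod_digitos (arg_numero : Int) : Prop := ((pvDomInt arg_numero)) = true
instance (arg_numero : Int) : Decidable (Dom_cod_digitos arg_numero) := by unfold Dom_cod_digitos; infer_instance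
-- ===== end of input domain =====

-- B replaces A's MSB-first digit extraction (10**(n-i) powers, per-step digit re-counts via a
-- growing 'contador', and mod-updating the argument) by one LSB-first divmod pass that takes the
-- leading digit of n*d by repeated division; simpler, same value on every non-negative input
-- (on negative inputs A's first digit-count loop never terminates, hence Pre_).


-- ===== PORT A =====
-- 'contador = 10; cifras = 1; while x // contador != 0: cifras += 1; contador *= 10':
-- fuel only makes the loop total; 64 steps cover every value reached inside Pre_
-- (all values there are below 10^64), so this is exactly the Python loop there.
def pvCountLoopA (fuel : Nat) (x contador cifras : Int) : Int :=
  match fuel with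
  | 0 => cifras
  | f+1 =>
      if PySem.Int.floordiv x contador ≠ 0 then pvCountLoopA f x (contador * 10) (cifras + 1)
      else cifras

def cod_digitos (arg_numero : Int) : Int :=
  let numero_codificado : Int := 0
  let cifras := pvCountLoopA 64 arg_numero 10 1
  let n := cifras
  -- 'for i in range(1, cifras + 1)' over the state (numero_codificado, arg_numero);
  -- the exponent n - i is ≥ 0 on every executed iteration, so '.toNat' is exact there.
  let st := (PySem.List.pyRange 1 (cifras + 1) 1).foldl (fun (st : Int × Int) i =>
      let cifra := PySem.Int.floordiv st.2 ((10 : Int) ^ (n - i).toNat)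
      let resultado := n * cifra
      let cifras_final := pvCountLoopA 64 resultado 10 1
      let final := PySem.Int.floordiv resultado ((10 : Int) ^ (cifras_final - 1).toNat)
      (st.1 + final * (10 : Int) ^ (n - i).toNat,
       PySem.Int.mod st.2 ((10 : Int) ^ (n - i).toNat)))
    (numero_codificado, arg_numero)
  st.1

-- ===== PORT B =====
-- 'while t >= 10: t //= 10' (leading digit of t)
def pvLeadB (t : Int) : Int :=
  if h : 10 ≤ t then pvLeadB (PySem.Int.floordiv t 10) else t
termination_by t.toNat
decreasing_by
  rw [PySem.Int.floordiv_eq_ediv_of_pos (by norm_num : (0:Int) < 10)]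
  omega

-- 'n = 1; t = arg_numero; while t >= 10: t //= 10; n += 1' (digit count)
def pvCountB (t n : Int) : Int :=
  if h : 10 ≤ t then pvCountB (PySem.Int.floordiv t 10) (n + 1) else n
termination_by t.toNat
decreasing_by
  rw [PySem.Int.floordiv_eq_ediv_of_pos (by norm_num : (0:Int) < 10)]
  omega

-- 'while x > 0: x, d = divmod(x, 10); t = n*d; …; res += t*p; p *= 10'
def pvMainB (x p res n : Int) : Int :=
  if h : 0 < x then
    pvMainB (PySem.Int.floordiv x 10) (p * 10)
      (res + pvLeadB (n * PySem.Int.mod x 10) * p) n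
  else res
termination_by x.toNat
decreasing_by
  rw [PySem.Int.floordiv_eq_ediv_of_pos (by norm_num : (0:Int) < 10)]
  omega

def cod_digitos_alt (arg_numero : Int) : Int :=
  pvMainB arg_numero 1 0 (pvCountB arg_numero 1)

-- ===== PRECONDITION & SPEC =====
-- Pre_ excludes negative inputs: there A's first 'while arg_numero // contador != 0' loop never
-- terminates (the floor quotient stays -1 forever), so A returns exactly on these inputs.
def Pre_cod_digitos (arg_numero : Int) : Prop := 0 ≤ arg_numero
instance (arg_numero : Int) : Decidable (Pre_cod_digitos arg_numero) := by
  unfold Pre_cod_digitos; infer_instance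
def pvWitness_cod_digitos : Int := (205)
def Spec_cod_digitos (arg_numero : Int) (out : Int) : Prop := out = cod_digitos_alt arg_numero
instance (arg_numero : Int) (out : Int) : Decidable (Spec_cod_digitos arg_numero out) := by unfold Spec_cod_digitos; infer_instance

-- ===== CLAIM (what is proved, stated in full; the proofs are below) =====
def Claim_equal_cod_digitos : Prop := ∀ (arg_numero : Int), Dom_cod_digitos arg_numero → Pre_cod_digitos arg_numero → Spec_cod_digitos arg_numero (cod_digitos arg_numero)

-- ===== LEMMAS AND PROOFS =====

-- leading decimal digit, decimal digit count, and the coded sum, on Nat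
def ldN (t : Nat) : Nat := if t < 10 then t else ldN (t / 10)
def dcN (x : Nat) : Nat := if x < 10 then 1 else dcN (x / 10) + 1
-- coded sum, least-significant digit first (mirrors B)
def EN (n : Nat) (x : Nat) : Nat :=
  if x = 0 then 0 else ldN (n * (x % 10)) + 10 * EN n (x / 10)
decreasing_by exact Nat.div_lt_self (by omega) (by norm_num)
-- coded sum over m fixed positions, most-significant first (mirrors A)
def GN (n : Nat) : Nat → Nat → Nat
  | 0, _ => 0
  | m+1, x => ldN (n * (x / 10 ^ m)) * 10 ^ m + GN n m (x % 10 ^ m)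

theorem dcN_pos (x : Nat) : 1 ≤ dcN x := by unfold dcN; split <;> omega

theorem dcN_lt (x : Nat) : x < 10 ^ dcN x := by
  fun_induction dcN x with
  | case1 x h => simpa using h
  | case2 x h ih =>
    rw [pow_succ]
    omega

theorem dcN_le_iff (c x : Nat) (hc : 1 ≤ c) : dcN x ≤ c ↔ x < 10 ^ c := by
  induction c generalizing x with
  | zero => omega
  | succ c ih =>
    unfold dcN
    split
    · rename_i h
      constructor
      · intro _; calc x < 10 := h
                  _ ≤ 10 ^ (c+1) := by exact Nat.le_self_pow (by omega) 10
      · intro _; omega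
    · rename_i h
      rcases Nat.eq_zero_or_pos c with hc0 | hc0
      · subst hc0
        have := dcN_pos (x/10)
        simp only [Nat.zero_add, pow_one]
        omega
      · rw [Nat.add_le_add_iff_right, ih _ hc0, pow_succ]
        rw [Nat.div_lt_iff_lt_mul (by norm_num)]

theorem ldN_eq_div (t : Nat) : ldN t = t / 10 ^ (dcN t - 1) := by
  fun_induction ldN t with
  | case1 t h => unfold dcN; rw [if_pos h]; simp
  | case2 t h ih =>
    conv_rhs => rw [dcN, if_neg h]
    rw [ih]
    have hd := dcN_pos (t/10)
    rw [Nat.add_sub_cancel, Nat.div_div_eq_div_mul, ← pow_succ']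
    have h2 : dcN (t/10) - 1 + 1 = dcN (t/10) := by omega
    rw [h2]

theorem ldN_zero : ldN 0 = 0 := by unfold ldN; simp

theorem GN_zero (n m : Nat) : GN n m 0 = 0 := by
  induction m with
  | zero => rfl
  | succ m ih => simp [GN, ih, ldN_zero]

theorem GN_lsb (n : Nat) : ∀ (m x : Nat), x < 10 ^ (m + 1) →
    GN n (m + 1) x = ldN (n * (x % 10)) + 10 * GN n m (x / 10) := by
  intro m
  induction m with
  | zero =>
    intro x hx
    simp only [GN, pow_zero] at *
    rw [Nat.mod_eq_of_lt (by omega)]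
    simp
  | succ m ih =>
    intro x hx
    show ldN (n * (x / 10 ^ (m+1))) * 10 ^ (m+1) + GN n (m+1) (x % 10 ^ (m+1)) = _
    rw [ih (x % 10 ^ (m+1)) (Nat.mod_lt _ (by positivity))]
    have e1 : x % 10 ^ (m+1) % 10 = x % 10 := by
      exact Nat.mod_mod_of_dvd x ⟨10 ^ m, by ring⟩
    have e2 : x % 10 ^ (m+1) / 10 = x / 10 % 10 ^ m := by
      rw [show (10:Nat) ^ (m+1) = 10 * 10 ^ m by ring]
      exact Nat.mod_mul_right_div_self x 10 (10 ^ m)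
    have e3 : x / 10 ^ (m+1) = x / 10 / 10 ^ m := by
      rw [Nat.div_div_eq_div_mul, ← pow_succ']
    rw [e1, e2, e3]
    show _ = ldN (n * (x % 10)) + 10 * (ldN (n * (x / 10 / 10 ^ m)) * 10 ^ m + GN n m (x / 10 % 10 ^ m))
    ring

theorem GN_eq_EN (n : Nat) : ∀ (m x : Nat), x < 10 ^ m → GN n m x = EN n x := by
  intro m
  induction m with
  | zero => intro x hx; simp at hx; subst hx; rw [GN_zero, EN]; simp
  | succ m ih =>
    intro x hx
    rcases Nat.eq_zero_or_pos x with h0 | h0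
    · subst h0; rw [GN_zero, EN]; simp
    · rw [GN_lsb n m x hx, EN, if_neg (by omega),
        ih (x / 10) (by rw [Nat.div_lt_iff_lt_mul (by norm_num), ← pow_succ]; exact hx)]

theorem floordiv_ten (t : Nat) : PySem.Int.floordiv (t : Int) 10 = ((t / 10 : Nat) : Int) := by
  exact_mod_cast PySem.Int.floordiv_natCast t 10

theorem mod_ten (t : Nat) : PySem.Int.mod (t : Int) 10 = ((t % 10 : Nat) : Int) := by
  exact_mod_cast PySem.Int.mod_natCast t 10

theorem pvLeadB_nat (t : Nat) : pvLeadB (t : Int) = ((ldN t : Nat) : Int) := by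
  induction t using Nat.strong_induction_on with
  | _ t ih =>
    rw [pvLeadB, ldN]
    split
    · rename_i h
      have h10 : (10:Nat) ≤ t := by exact_mod_cast h
      rw [if_neg (by omega), floordiv_ten, ih (t / 10) (by omega)]
    · rename_i h
      rw [if_pos (by omega)]

theorem pvCountB_nat (t : Nat) : ∀ (n : Int), pvCountB (t : Int) n = n + ((dcN t : Nat) : Int) - 1 := by
  induction t using Nat.strong_induction_on with
  | _ t ih =>
    intro n
    rw [pvCountB, dcN]
    split
    · rename_i h
      have h10 : (10:Nat) ≤ t := by exact_mod_cast h
      rw [if_neg (by omega), floordiv_ten, ih (t / 10) (by omega)]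
      push_cast
      ring
    · rename_i h
      rw [if_pos (by omega)]
      push_cast
      ring

theorem pvMainB_nat : ∀ (x : Nat) (p res : Int) (nN : Nat),
    pvMainB (x : Int) p res (nN : Int) = res + p * ((EN nN x : Nat) : Int) := by
  intro x
  induction x using Nat.strong_induction_on with
  | _ x ih =>
    intro p res nN
    rw [pvMainB, EN]
    split
    · rename_i h
      have h0 : 0 < x := by exact_mod_cast h
      rw [if_neg (by omega), floordiv_ten, mod_ten]
      have e : (nN : Int) * ((x % 10 : Nat) : Int) = ((nN * (x % 10) : Nat) : Int) := by push_cast; ring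
      rw [e, pvLeadB_nat, ih (x / 10) (by omega)]
      push_cast
      ring
    · rename_i h
      have h0 : x = 0 := by omega
      subst h0
      rw [if_pos rfl]
      simp

theorem countLoopA_spec (fuel : Nat) : ∀ (c : Nat) (x : Nat), 1 ≤ c → x < 10 ^ (c + fuel) →
    pvCountLoopA fuel (x : Int) ((10 : Int) ^ c) (c : Int) = ((max c (dcN x) : Nat) : Int) := by
  induction fuel with
  | zero =>
    intro c x hc hx
    rw [Nat.add_zero] at hx
    have : dcN x ≤ c := (dcN_le_iff c x hc).mpr hx
    show (c : Int) = _
    rw [Nat.max_eq_left this]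
  | succ f ih =>
    intro c x hc hx
    show (if PySem.Int.floordiv (x : Int) ((10:Int) ^ c) ≠ 0 then
        pvCountLoopA f (x : Int) ((10:Int) ^ c * 10) ((c : Int) + 1) else (c : Int)) = _
    have hfd : PySem.Int.floordiv (x : Int) ((10:Int) ^ c) = ((x / 10 ^ c : Nat) : Int) := by
      have : ((10:Int) ^ c) = ((10 ^ c : Nat) : Int) := by push_cast; ring
      rw [this]
      exact_mod_cast PySem.Int.floordiv_natCast x (10 ^ c)
    rw [hfd]
    by_cases hbig : 10 ^ c ≤ x
    · have hnz : ((x / 10 ^ c : Nat) : Int) ≠ 0 := by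
        have h0 : x / 10 ^ c ≠ 0 := Nat.div_ne_zero_iff.mpr ⟨by positivity, hbig⟩
        exact_mod_cast h0
      rw [if_pos hnz]
      have e1 : ((10:Int) ^ c * 10) = (10:Int) ^ (c + 1) := by ring
      have e2 : ((c : Int) + 1) = ((c + 1 : Nat) : Int) := by push_cast; ring
      rw [e1, e2, ih (c+1) x (by omega) (by rw [show c + 1 + f = c + (f+1) by ring]; exact hx)]
      have hgt : ¬ dcN x ≤ c := fun hle => by
        have := (dcN_le_iff c x hc).mp hle; omega
      congr 1
      omega
    · have h0 : x / 10 ^ c = 0 := Nat.div_eq_of_lt (by omega)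
      rw [if_neg (by simp [h0])]
      have : dcN x ≤ c := (dcN_le_iff c x hc).mpr (by omega)
      rw [Nat.max_eq_left this]

theorem countLoopA_dc (x : Nat) (hx : x < 10 ^ 64) :
    pvCountLoopA 64 (x : Int) 10 1 = ((dcN x : Nat) : Int) := by
  have h := countLoopA_spec 64 1 x (by omega) (by
    calc x < 10 ^ 64 := hx
      _ ≤ 10 ^ (1 + 64) := by norm_num)
  rw [Nat.max_eq_right (dcN_pos x)] at h
  simpa using h

theorem foldA_spec (nN : Nat) (hn : nN ≤ 10) : ∀ (m : Nat) (acc : Int) (x : Nat), x < 10 ^ m →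
    ((PySem.List.pyRange ((nN : Int) - (m : Int) + 1) ((nN : Int) + 1) 1).foldl
      (fun (st : Int × Int) i =>
        let cifra := PySem.Int.floordiv st.2 ((10 : Int) ^ ((nN : Int) - i).toNat)
        let resultado := (nN : Int) * cifra
        let cifras_final := pvCountLoopA 64 resultado 10 1
        let final := PySem.Int.floordiv resultado ((10 : Int) ^ (cifras_final - 1).toNat)
        (st.1 + final * (10 : Int) ^ ((nN : Int) - i).toNat,
         PySem.Int.mod st.2 ((10 : Int) ^ ((nN : Int) - i).toNat)))
      (acc, (x : Int))) = (acc + ((GN nN m x : Nat) : Int), 0) := by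
  intro m
  induction m with
  | zero =>
    intro acc x hx
    have hx0 : x = 0 := by omega
    subst hx0
    have he : ((nN : Int) - ((0:Nat) : Int) + 1) = (nN : Int) + 1 := by push_cast; ring
    rw [he, show PySem.List.pyRange ((nN:Int)+1) ((nN:Int)+1) 1 = [] by
      simp [PySem.List.pyRange]]
    simp [GN]
  | succ m ih =>
    intro acc x hx
    set i0 : Int := (nN : Int) - ((m+1 : Nat) : Int) + 1 with hi0
    have hlt : i0 < (nN : Int) + 1 := by rw [hi0]; push_cast; omega
    rw [PySem.List.pyRange_one_cons hlt, List.foldl_cons]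
    have he : ((nN : Int) - i0) = ((m : Nat) : Int) := by rw [hi0]; push_cast; ring
    have htn : ((nN : Int) - i0).toNat = m := by rw [he]; exact Int.toNat_natCast m
    have hpow : ((10:Int) ^ m) = ((10 ^ m : Nat) : Int) := by push_cast; ring
    have hdig : x / 10 ^ m < 10 :=
      Nat.div_lt_of_lt_mul (by rw [← pow_succ]; exact hx)
    have hfd : PySem.Int.floordiv ((x:Nat) : Int) ((10:Int) ^ ((nN : Int) - i0).toNat)
        = ((x / 10 ^ m : Nat) : Int) := by
      rw [htn, hpow]; exact_mod_cast PySem.Int.floordiv_natCast x (10 ^ m)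
    have hres : (nN : Int) * ((x / 10 ^ m : Nat) : Int) = ((nN * (x / 10 ^ m) : Nat) : Int) := by
      push_cast; ring
    have hrb : nN * (x / 10 ^ m) < 10 ^ 64 := by
      calc nN * (x / 10 ^ m) ≤ 10 * 9 := Nat.mul_le_mul hn (by omega)
        _ < 10 ^ 64 := by norm_num
    have hcl : pvCountLoopA 64 ((nN * (x / 10 ^ m) : Nat) : Int) 10 1
        = ((dcN (nN * (x / 10 ^ m)) : Nat) : Int) := countLoopA_dc _ hrb
    have hm1 : (((dcN (nN * (x / 10 ^ m)) : Nat) : Int) - 1).toNat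
        = dcN (nN * (x / 10 ^ m)) - 1 := by
      have := dcN_pos (nN * (x / 10 ^ m)); omega
    have hfin : PySem.Int.floordiv ((nN * (x / 10 ^ m) : Nat) : Int)
        ((10:Int) ^ (dcN (nN * (x / 10 ^ m)) - 1))
        = ((ldN (nN * (x / 10 ^ m)) : Nat) : Int) := by
      rw [show ((10:Int) ^ (dcN (nN * (x / 10 ^ m)) - 1)) = ((10 ^ (dcN (nN * (x / 10 ^ m)) - 1) : Nat) : Int) by push_cast; ring]
      rw [ldN_eq_div]
      exact_mod_cast PySem.Int.floordiv_natCast (nN * (x / 10 ^ m)) (10 ^ (dcN (nN * (x / 10 ^ m)) - 1))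
    have hmod : PySem.Int.mod ((x:Nat) : Int) ((10:Int) ^ ((nN : Int) - i0).toNat)
        = ((x % 10 ^ m : Nat) : Int) := by
      rw [htn, hpow]; exact_mod_cast PySem.Int.mod_natCast x (10 ^ m)
    have hnext : i0 + 1 = (nN : Int) - ((m : Nat) : Int) + 1 := by rw [hi0]; push_cast; ring
    dsimp only
    rw [hfd, hres, hcl, hm1, hfin, hmod, htn, hnext,
      ih (acc + ((ldN (nN * (x / 10 ^ m)) : Nat) : Int) * (10:Int) ^ m) (x % 10 ^ m)
        (Nat.mod_lt _ (by positivity))]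
    show (_, (0:Int)) = (_, (0:Int))
    rw [Prod.mk.injEq]
    refine ⟨?_, rfl⟩
    show acc + ((ldN (nN * (x / 10 ^ m)) : Nat) : Int) * (10:Int) ^ m + ((GN nN m (x % 10 ^ m) : Nat) : Int)
        = acc + ((GN nN (m+1) x : Nat) : Int)
    rw [show GN nN (m+1) x = ldN (nN * (x / 10 ^ m)) * 10 ^ m + GN nN m (x % 10 ^ m) from rfl]
    push_cast
    ring

theorem final_eq (a : Int) (hdom : a ≤ 2147483648) (hpre : 0 ≤ a) :
    cod_digitos a = cod_digitos_alt a := by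
  set aN := a.toNat with haN
  have ha : ((aN : Nat) : Int) = a := Int.toNat_of_nonneg hpre
  have haB : aN ≤ 2147483648 := by omega
  have h64 : aN < 10 ^ 64 := by
    calc aN ≤ 2147483648 := haB
      _ < 10 ^ 64 := by norm_num
  have h10 : aN < 10 ^ 10 := by
    calc aN ≤ 2147483648 := haB
      _ < 10 ^ 10 := by norm_num
  set nN := dcN aN with hnN
  have hn : nN ≤ 10 := (dcN_le_iff 10 aN (by omega)).mpr h10
  have hcl : pvCountLoopA 64 a 10 1 = ((nN : Nat) : Int) := by
    rw [← ha]; exact countLoopA_dc aN h64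
  have hf := foldA_spec nN hn nN 0 aN (dcN_lt aN)
  rw [show ((nN : Int) - (nN : Int) + 1) = 1 by ring] at hf
  have hcb : pvCountB a 1 = ((nN : Nat) : Int) := by
    rw [← ha, pvCountB_nat aN 1]; ring
  unfold cod_digitos cod_digitos_alt
  dsimp only
  rw [hcl, hcb, ← ha, hf, pvMainB_nat aN 1 0 nN,
    GN_eq_EN nN nN aN (dcN_lt aN)]
  simp

-- ===== VERDICT (by name: the statement is the Claim_ definition above) =====
theorem cod_digitos_spec : Claim_equal_cod_digitos := by
  intro a hdom hpre
  have hd : -2147483648 ≤ a ∧ a ≤ 2147483648 := by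
    unfold Dom_cod_digitos pvDomInt at hdom
    exact of_decide_eq_true hdom
  exact final_eq a hd.2 hpre
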